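-- pv_equiv track=rewrite | github.com/openvinotoolkit/training_extensions | pytorch_toolkit/instance_segmentation/segmentoly/utils/weight_converters.py | resnet_block
-- ===== SOURCE A (Python) =====
-- def resnet_block(stage_idx, block_idx):
--     mapping_template = {
--         'module.backbone.body.layer{}.{}.conv1.weight': 'backbone.stages.stage_{}.{}.conv1.weight',
--         'module.backbone.body.layer{}.{}.bn1.weight': 'backbone.stages.stage_{}.{}.bn1.weight',
--         'module.backbone.body.layer{}.{}.bn1.bias': 'backbone.stages.stage_{}.{}.bn1.bias',
--         'module.backbone.body.layer{}.{}.bn1.running_mean': 'backbone.stages.stage_{}.{}.bn1.running_mean',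
--         'module.backbone.body.layer{}.{}.bn1.running_var': 'backbone.stages.stage_{}.{}.bn1.running_var',
--         'module.backbone.body.layer{}.{}.conv2.weight': 'backbone.stages.stage_{}.{}.conv2.weight',
--         'module.backbone.body.layer{}.{}.bn2.weight': 'backbone.stages.stage_{}.{}.bn2.weight',
--         'module.backbone.body.layer{}.{}.bn2.bias': 'backbone.stages.stage_{}.{}.bn2.bias',
--         'module.backbone.body.layer{}.{}.bn2.running_mean': 'backbone.stages.stage_{}.{}.bn2.running_mean',
--         'module.backbone.body.layer{}.{}.bn2.running_var': 'backbone.stages.stage_{}.{}.bn2.running_var',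
--         'module.backbone.body.layer{}.{}.conv3.weight': 'backbone.stages.stage_{}.{}.conv3.weight',
--         'module.backbone.body.layer{}.{}.bn3.weight': 'backbone.stages.stage_{}.{}.bn3.weight',
--         'module.backbone.body.layer{}.{}.bn3.bias': 'backbone.stages.stage_{}.{}.bn3.bias',
--         'module.backbone.body.layer{}.{}.bn3.running_mean': 'backbone.stages.stage_{}.{}.bn3.running_mean',
--         'module.backbone.body.layer{}.{}.bn3.running_var': 'backbone.stages.stage_{}.{}.bn3.running_var',
--     }
--     mapping = {k.format(stage_idx, block_idx): v.format(stage_idx, block_idx)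
--                for k, v in mapping_template.items()}
--     return mapping
-- ===== SOURCE B (Python) =====
-- def resnet_block(stage_idx, block_idx):
--     mapping = {}
--     for n in (1, 2, 3):
--         for suffix in ('conv{}.weight'.format(n),
--                        'bn{}.weight'.format(n),
--                        'bn{}.bias'.format(n),
--                        'bn{}.running_mean'.format(n),
--                        'bn{}.running_var'.format(n)):
--             src = 'module.backbone.body.layer{}.{}.{}'.format(stage_idx, block_idx, suffix)
--             dst = 'backbone.stages.stage_{}.{}.{}'.format(stage_idx, block_idx, suffix)
--             mapping[src] = dst
--     return mapping
-- ===== Notes on version B (the rewrite author's own statement) =====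
-- stated objective: simpler
-- what changed: Replaces the 15-entry literal template dict with a nested loop over sub-block index n in (1,2,3) and the five per-n parameter suffixes, generating each key/value pair from one pair of format strings.
import Mathlib
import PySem

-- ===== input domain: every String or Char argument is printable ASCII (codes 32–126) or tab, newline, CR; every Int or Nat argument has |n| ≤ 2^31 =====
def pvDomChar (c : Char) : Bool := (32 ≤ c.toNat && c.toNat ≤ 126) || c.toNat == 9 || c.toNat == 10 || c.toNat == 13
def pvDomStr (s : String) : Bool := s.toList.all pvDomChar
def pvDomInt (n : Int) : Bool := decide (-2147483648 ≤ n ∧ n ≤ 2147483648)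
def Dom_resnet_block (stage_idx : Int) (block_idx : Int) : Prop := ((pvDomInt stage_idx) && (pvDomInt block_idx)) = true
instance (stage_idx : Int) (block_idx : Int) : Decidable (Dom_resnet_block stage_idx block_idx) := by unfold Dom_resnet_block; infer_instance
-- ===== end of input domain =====

-- B replaces A's 15-entry literal template dict with a nested loop over sub-block
-- index n ∈ (1,2,3) and the five per-n parameter suffixes (objective: simpler).


-- ===== PORT A =====
-- A's dict comprehension formats each literal template with (stage_idx, block_idx);
-- '{}'.format on these known literals is ported exactly as splicing str(arg) at the
-- placeholder positions; the dict (distinct keys) is the association list in insertion order.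
def resnet_block (stage_idx : Int) (block_idx : Int) : List (String × String) :=
  let s := PySem.Int.toStr stage_idx
  let b := PySem.Int.toStr block_idx
  [ ("module.backbone.body.layer" ++ s ++ "." ++ b ++ ".conv1.weight",
     "backbone.stages.stage_" ++ s ++ "." ++ b ++ ".conv1.weight"),
    ("module.backbone.body.layer" ++ s ++ "." ++ b ++ ".bn1.weight",
     "backbone.stages.stage_" ++ s ++ "." ++ b ++ ".bn1.weight"),
    ("module.backbone.body.layer" ++ s ++ "." ++ b ++ ".bn1.bias",
     "backbone.stages.stage_" ++ s ++ "." ++ b ++ ".bn1.bias"),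
    ("module.backbone.body.layer" ++ s ++ "." ++ b ++ ".bn1.running_mean",
     "backbone.stages.stage_" ++ s ++ "." ++ b ++ ".bn1.running_mean"),
    ("module.backbone.body.layer" ++ s ++ "." ++ b ++ ".bn1.running_var",
     "backbone.stages.stage_" ++ s ++ "." ++ b ++ ".bn1.running_var"),
    ("module.backbone.body.layer" ++ s ++ "." ++ b ++ ".conv2.weight",
     "backbone.stages.stage_" ++ s ++ "." ++ b ++ ".conv2.weight"),
    ("module.backbone.body.layer" ++ s ++ "." ++ b ++ ".bn2.weight",
     "backbone.stages.stage_" ++ s ++ "." ++ b ++ ".bn2.weight"),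
    ("module.backbone.body.layer" ++ s ++ "." ++ b ++ ".bn2.bias",
     "backbone.stages.stage_" ++ s ++ "." ++ b ++ ".bn2.bias"),
    ("module.backbone.body.layer" ++ s ++ "." ++ b ++ ".bn2.running_mean",
     "backbone.stages.stage_" ++ s ++ "." ++ b ++ ".bn2.running_mean"),
    ("module.backbone.body.layer" ++ s ++ "." ++ b ++ ".bn2.running_var",
     "backbone.stages.stage_" ++ s ++ "." ++ b ++ ".bn2.running_var"),
    ("module.backbone.body.layer" ++ s ++ "." ++ b ++ ".conv3.weight",
     "backbone.stages.stage_" ++ s ++ "." ++ b ++ ".conv3.weight"),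
    ("module.backbone.body.layer" ++ s ++ "." ++ b ++ ".bn3.weight",
     "backbone.stages.stage_" ++ s ++ "." ++ b ++ ".bn3.weight"),
    ("module.backbone.body.layer" ++ s ++ "." ++ b ++ ".bn3.bias",
     "backbone.stages.stage_" ++ s ++ "." ++ b ++ ".bn3.bias"),
    ("module.backbone.body.layer" ++ s ++ "." ++ b ++ ".bn3.running_mean",
     "backbone.stages.stage_" ++ s ++ "." ++ b ++ ".bn3.running_mean"),
    ("module.backbone.body.layer" ++ s ++ "." ++ b ++ ".bn3.running_var",
     "backbone.stages.stage_" ++ s ++ "." ++ b ++ ".bn3.running_var") ]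

-- ===== PORT B =====
-- per-n suffix tuple of Source B ('conv{n}.weight', 'bn{n}.weight', …)
def pvSuffixes (n : Int) : List String :=
  [ "conv" ++ PySem.Int.toStr n ++ ".weight",
    "bn" ++ PySem.Int.toStr n ++ ".weight",
    "bn" ++ PySem.Int.toStr n ++ ".bias",
    "bn" ++ PySem.Int.toStr n ++ ".running_mean",
    "bn" ++ PySem.Int.toStr n ++ ".running_var" ]

-- the nested loop of Source B; all generated keys are fresh, so each dict insert appends
def resnet_block_alt (stage_idx : Int) (block_idx : Int) : List (String × String) :=
  ([1, 2, 3] : List Int).foldl (fun acc n =>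
    (pvSuffixes n).foldl (fun acc suffix =>
      acc ++ [("module.backbone.body.layer" ++ PySem.Int.toStr stage_idx ++ "." ++
                 PySem.Int.toStr block_idx ++ "." ++ suffix,
               "backbone.stages.stage_" ++ PySem.Int.toStr stage_idx ++ "." ++
                 PySem.Int.toStr block_idx ++ "." ++ suffix)]) acc) []

-- ===== PRECONDITION & SPEC =====
def Spec_resnet_block (stage_idx : Int) (block_idx : Int) (out : List (String × String)) : Prop := out = resnet_block_alt stage_idx block_idx
instance (stage_idx : Int) (block_idx : Int) (out : List (String × String)) : Decidable (Spec_resnet_block stage_idx block_idx out) := by unfold Spec_resnet_block; infer_instance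

-- ===== CLAIM (what is proved, stated in full; the proofs are below) =====
def Claim_equal_resnet_block : Prop := ∀ (stage_idx : Int) (block_idx : Int), Dom_resnet_block stage_idx block_idx → Spec_resnet_block stage_idx block_idx (resnet_block stage_idx block_idx)

-- ===== LEMMAS AND PROOFS =====

-- ===== VERDICT (by name: the statement is the Claim_ definition above) =====
theorem resnet_block_spec : Claim_equal_resnet_block := by
  intro stage_idx block_idx _
  unfold Spec_resnet_block resnet_block resnet_block_alt pvSuffixes
  have h1 : PySem.Int.toStr 1 = "1" := by decide
  have h2 : PySem.Int.toStr 2 = "2" := by decide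
  have h3 : PySem.Int.toStr 3 = "3" := by decide
  simp [h1, h2, h3, String.append_assoc]
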